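-- pv_equiv track=rewrite | github.com/rdorrigan/Retail-4-5-4-Calendar | gc_retail_week.py | gc_week_string
-- ===== SOURCE A (Python) =====
-- def gc_week_string(gcw):
--     if gcw is None:
--         return ''
--     # elif len(str(gcw)) != 6:
--     #     return ''
--     split = list(str(gcw))
--     yw = ''
--     for s in split:
--         if len(yw) != 3:
--             yw = yw+s
--         else:
--             yw = yw+s+'-'
--     return yw
-- ===== SOURCE B (Python) =====
-- def gc_week_string(gcw):
--     if gcw is None:
--         return ''
--     s = str(gcw)
--     if len(s) < 4:
--         return s
--     return s[:4] + '-' + s[4:]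
-- ===== Notes on version B (the rewrite author's own statement) =====
-- stated objective: simpler
-- what changed: Replaces the char-by-char accumulation loop (which inserts a dash when the running string has length 3) by direct positional slicing: return str(gcw) unchanged when shorter than 4 chars, else s[:4] + '-' + s[4:].
import Mathlib
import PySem

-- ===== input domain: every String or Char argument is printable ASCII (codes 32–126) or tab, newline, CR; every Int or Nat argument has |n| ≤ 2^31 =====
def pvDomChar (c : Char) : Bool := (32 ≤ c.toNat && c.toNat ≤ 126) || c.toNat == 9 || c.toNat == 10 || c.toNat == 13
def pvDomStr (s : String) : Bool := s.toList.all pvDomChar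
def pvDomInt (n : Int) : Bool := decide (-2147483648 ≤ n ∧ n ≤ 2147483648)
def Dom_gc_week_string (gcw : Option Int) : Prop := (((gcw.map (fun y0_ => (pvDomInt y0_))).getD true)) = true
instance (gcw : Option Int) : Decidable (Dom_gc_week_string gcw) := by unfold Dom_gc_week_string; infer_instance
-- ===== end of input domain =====

-- B replaces A's char-by-char dash-inserting accumulation loop by direct positional slicing (simpler).

-- ===== PORT A =====
-- Python strings are ported as List Char per PySem.Chars convention; yw starts as ''
def gc_week_string (gcw : Option Int) : String :=
  match gcw with
  | none => ""
  | some n =>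
    let split := PySem.Int.toChars n       -- list(str(gcw))
    let yw := split.foldl
      (fun yw s => if yw.length ≠ 3 then yw ++ [s] else yw ++ [s] ++ ['-']) []
    String.ofList yw

-- ===== PORT B =====
def gc_week_string_alt (gcw : Option Int) : String :=
  match gcw with
  | none => ""
  | some n =>
    let s := PySem.Int.toChars n           -- str(gcw)
    if s.length < 4 then String.ofList s
    else String.ofList (PySem.List.slice s none (some 4) ++ ['-'] ++ PySem.List.slice s (some 4) none)

-- ===== PRECONDITION & SPEC =====
def Spec_gc_week_string (gcw : Option Int) (out : String) : Prop := out = gc_week_string_alt gcw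
instance (gcw : Option Int) (out : String) : Decidable (Spec_gc_week_string gcw out) := by unfold Spec_gc_week_string; infer_instance

-- ===== CLAIM (what is proved, stated in full; the proofs are below) =====
def Claim_equal_gc_week_string : Prop := ∀ (gcw : Option Int), Dom_gc_week_string gcw → Spec_gc_week_string gcw (gc_week_string gcw)

-- ===== LEMMAS AND PROOFS =====

-- once the accumulator is past length 3, A's loop only appends
lemma pvLoop_long (l acc : List Char) (h : 4 ≤ acc.length) :
    l.foldl (fun yw s => if yw.length ≠ 3 then yw ++ [s] else yw ++ [s] ++ ['-']) acc
      = acc ++ l := by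
  induction l generalizing acc with
  | nil => simp
  | cons c t ih =>
    simp only [List.foldl_cons]
    rw [if_pos (by omega)]
    rw [ih (acc ++ [c]) (by simp; omega)]
    simp

-- characterisation of A's loop from the empty accumulator
lemma pvLoop_eq (l : List Char) :
    l.foldl (fun yw s => if yw.length ≠ 3 then yw ++ [s] else yw ++ [s] ++ ['-']) []
      = if l.length < 4 then l else l.take 4 ++ ['-'] ++ l.drop 4 := by
  match l with
  | [] => simp
  | [a] => simp
  | [a, b] => simp
  | [a, b, c] => simp
  | a :: b :: c :: d :: t =>
    show List.foldl (fun yw s => if yw.length ≠ 3 then yw ++ [s] else yw ++ [s] ++ ['-'])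
        [a, b, c, d, '-'] t = _
    rw [pvLoop_long t [a, b, c, d, '-'] (by simp)]
    simp

-- ===== VERDICT (by name: the statement is the Claim_ definition above) =====
theorem gc_week_string_spec : Claim_equal_gc_week_string := by
  intro gcw _
  unfold Spec_gc_week_string gc_week_string gc_week_string_alt
  match gcw with
  | none => rfl
  | some n =>
    simp only
    rw [pvLoop_eq]
    split_ifs with h
    · rfl
    · congr 1
      rw [show ((4:Int)) = ((4:Nat):Int) from rfl] at *
      rw [PySem.List.slice_to_natCast, PySem.List.slice_from_natCast]
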